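-- pv_equiv track=rewrite | github.com/lds530/pycode | lcs.py | Count
-- ===== SOURCE A (Python) =====
-- def Count(diff):
--     u=0
--     d=0
--     i=0
--     c=len(diff)
--     for t in diff:
--         if(t[0]=='u'):
--             u+=1
--         elif(t[0]=='d'):
--             d+=1
--         else:
--             i+=1
--     result=[c,u,d,i]
--     return result
-- ===== SOURCE B (Python) =====
-- def Count(diff):
--     firsts = [t[0] for t in diff]
--     c = len(firsts)
--     u = firsts.count('u')
--     d = firsts.count('d')
--     return [c, u, d, c - u - d]
-- ===== Notes on version B (the rewrite author's own statement) =====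
-- stated objective: alternative
-- what changed: B replaces A's single pass with three scalar if/elif/else counters by staged passes: it materialises the list of first characters once, counts 'u' and 'd' with list.count, and derives the third count by subtraction from the total, eliminating the else branch entirely.
import Mathlib
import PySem

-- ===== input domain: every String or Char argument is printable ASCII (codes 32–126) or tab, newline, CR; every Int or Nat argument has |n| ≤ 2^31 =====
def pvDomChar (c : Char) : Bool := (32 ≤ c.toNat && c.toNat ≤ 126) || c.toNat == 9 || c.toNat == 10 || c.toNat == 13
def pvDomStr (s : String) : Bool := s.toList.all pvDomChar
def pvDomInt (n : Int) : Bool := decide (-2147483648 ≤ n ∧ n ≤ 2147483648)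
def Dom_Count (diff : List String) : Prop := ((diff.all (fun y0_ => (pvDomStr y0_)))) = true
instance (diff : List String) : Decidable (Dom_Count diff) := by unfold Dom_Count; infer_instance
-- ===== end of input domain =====

-- B replaces A's single branching pass with three scalar counters by staged passes:
-- materialise the first characters once, count 'u' and 'd' with list.count, and get
-- the third count by subtraction from the total (objective: alternative, same cost).

-- ===== PORT A =====
-- t[0] is PySem.Str.pyGet? t 0; on "" Python raises IndexError (excluded by Pre_; the none branch is unreachable there).
def Count (diff : List String) : List Int :=
  let s : Int × Int × Int := diff.foldl (fun s t =>
    match PySem.Str.pyGet? t 0 with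
    | some c =>
        if c == 'u' then (s.1 + 1, s.2.1, s.2.2)
        else if c == 'd' then (s.1, s.2.1 + 1, s.2.2)
        else (s.1, s.2.1, s.2.2 + 1)
    | none => s) (0, 0, 0)
  [(diff.length : Int), s.1, s.2.1, s.2.2]

-- ===== PORT B =====
-- [t[0] for t in diff] raises IndexError on ""; excluded by Pre_, so filterMap's drop of none is exact there.
def Count_alt (diff : List String) : List Int :=
  let firsts : List Char := diff.filterMap (fun t => PySem.Str.pyGet? t 0)
  let c : Int := firsts.length
  let u : Int := firsts.count 'u'
  let d : Int := firsts.count 'd'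
  [c, u, d, c - u - d]

-- ===== PRECONDITION & SPEC =====
-- Pre_ excludes lists containing an empty string: there t[0] raises IndexError in A (and in B).
def Pre_Count (diff : List String) : Prop := "" ∉ diff
instance (diff : List String) : Decidable (Pre_Count diff) := by unfold Pre_Count; infer_instance
def pvWitness_Count : List String := ["up", "down", "x"]
def Spec_Count (diff : List String) (out : List Int) : Prop := out = Count_alt diff
instance (diff : List String) (out : List Int) : Decidable (Spec_Count diff out) := by unfold Spec_Count; infer_instance

-- ===== CLAIM (what is proved, stated in full; the proofs are below) =====
def Claim_equal_Count : Prop := ∀ (diff : List String), Dom_Count diff → Pre_Count diff → Spec_Count diff (Count diff)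

-- ===== LEMMAS AND PROOFS =====

lemma first_ne_empty {t : String} (h : t ≠ "") : ∃ c, PySem.Str.pyGet? t 0 = some c := by
  cases ht : t.toList with
  | nil => exact absurd (String.toList_eq_nil_iff.mp ht) h
  | cons c rest =>
    exact ⟨c, by simp [PySem.Str.pyGet?, PySem.List.pyGet?, PySem.List.pyIdx?, ht]⟩

-- A's fold written with explicit accumulators equals accumulators + countP's
lemma foldA_eq (l : List String) (u d i : Int) :
    l.foldl (fun (s : Int × Int × Int) t =>
      match PySem.Str.pyGet? t 0 with
      | some c =>
          if c == 'u' then (s.1 + 1, s.2.1, s.2.2)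
          else if c == 'd' then (s.1, s.2.1 + 1, s.2.2)
          else (s.1, s.2.1, s.2.2 + 1)
      | none => s) (u, d, i)
    = (u + l.countP (fun t => PySem.Str.pyGet? t 0 == some 'u'),
       d + l.countP (fun t => PySem.Str.pyGet? t 0 == some 'd'),
       i + l.countP (fun t => (PySem.Str.pyGet? t 0).isSome &&
             !(PySem.Str.pyGet? t 0 == some 'u') && !(PySem.Str.pyGet? t 0 == some 'd'))) := by
  induction l generalizing u d i with
  | nil => simp
  | cons t rest ih =>
    simp only [List.foldl_cons, List.countP_cons]
    cases hf : PySem.Str.pyGet? t 0 with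
    | none => simp only [hf, ih]; simp
    | some c =>
      by_cases hu : c = 'u'
      · subst hu; simp only [hf, ih]
        refine Prod.ext ?_ (Prod.ext ?_ ?_) <;> (simp; try ring)
      · by_cases hd : c = 'd'
        · subst hd; simp only [hf, ih]
          refine Prod.ext ?_ (Prod.ext ?_ ?_) <;> (simp [hu]; try ring)
        · simp only [hf, ih]
          refine Prod.ext ?_ (Prod.ext ?_ ?_) <;> (simp [hu, hd]; try ring)

-- counting a value in the materialised first-character list = countP on the sources
lemma count_filterMap {a b : Type} [DecidableEq b] (f : a → Option b) (l : List a) (x : b) :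
    (l.filterMap f).count x = l.countP (fun t => f t == some x) := by
  induction l with
  | nil => simp
  | cons t rest ih =>
    rw [List.filterMap_cons, List.countP_cons]
    cases hf : f t with
    | none => simp [hf, ih]
    | some c =>
      by_cases hx : c = x
      · subst hx; simp [hf, ih, List.count_cons]
      · simp [hf, ih, List.count_cons, hx, Ne.symm hx]

-- when f is defined on every element, filterMap keeps the length
lemma length_filterMap_all_some {a b : Type} (f : a → Option b) (l : List a)
    (h : ∀ t ∈ l, (f t).isSome) :
    (l.filterMap f).length = l.length := by
  induction l with
  | nil => simp
  | cons t rest ih =>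
    rw [List.filterMap_cons]
    cases hf : f t with
    | none => exact absurd (h t List.mem_cons_self) (by simp [hf])
    | some c => simp [ih (fun u m => h u (List.mem_cons_of_mem _ m))]

-- on lists without "", the three categories partition the list
lemma partition_counts (l : List String) (h : "" ∉ l) :
    (l.countP (fun t => PySem.Str.pyGet? t 0 == some 'u') : Int)
    + l.countP (fun t => PySem.Str.pyGet? t 0 == some 'd')
    + l.countP (fun t => (PySem.Str.pyGet? t 0).isSome &&
        !(PySem.Str.pyGet? t 0 == some 'u') && !(PySem.Str.pyGet? t 0 == some 'd'))
    = l.length := by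
  induction l with
  | nil => simp
  | cons t rest ih =>
    have ht : t ≠ "" := fun e => h (e ▸ List.mem_cons_self)
    have hih := ih (fun m => h (List.mem_cons_of_mem _ m))
    obtain ⟨c, hc⟩ := first_ne_empty ht
    simp only [List.countP_cons, List.length_cons, hc]
    simp at hih
    by_cases hu : c = 'u'
    · subst hu; simp; omega
    · by_cases hd : c = 'd'
      · subst hd; simp; omega
      · simp [hu, hd]; omega

-- ===== VERDICT (by name: the statement is the Claim_ definition above) =====
theorem Count_spec : Claim_equal_Count := by
  intro diff _ hpre
  have hsome : ∀ t ∈ diff, (PySem.Str.pyGet? t 0).isSome := by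
    intro t ht
    obtain ⟨c, hc⟩ := first_ne_empty (fun e => hpre (e ▸ ht))
    rw [hc]; rfl
  unfold Spec_Count Count Count_alt
  simp only [foldA_eq, count_filterMap, length_filterMap_all_some _ _ hsome, zero_add,
    List.cons.injEq]
  have hpart := partition_counts diff hpre
  refine ⟨trivial, trivial, trivial, ?_, trivial⟩
  omega
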